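-- pv_equiv track=rewrite | github.com/posl/comment_recommendation | script/mod_gen/4_time/zh/216_C/3.py | solve
-- ===== SOURCE A (Python) =====
-- def solve(n):
--     s = ""
--     while n > 0:
--         if n % 2 == 0:
--             s = "B" + s
--             n = n // 2
--         else:
--             s = "A" + s
--             n -= 1
--     return s
-- ===== SOURCE B (Python) =====
-- def solve(n):
--     if n <= 0:
--         return ""
--     # binary digits of n, MSB first
--     bits = []
--     m = n
--     while m > 0:
--         bits.append('1' if m % 2 == 1 else '0')
--         m //= 2
--     bits.reverse()
--     out = ["A"]  # the leading '1'
--     for d in bits[1:]: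
--         out.append("B")
--         if d == '1':
--             out.append("A")
--     return "".join(out)
-- ===== Notes on version B (the rewrite author's own statement) =====
-- stated objective: alternative
-- what changed: B computes n's binary digits once and builds the string left-to-right in one pass over the digits (A for the leading 1, then B per digit plus A per set bit), instead of A's halving/decrement loop that prepends one character per step.
import Mathlib
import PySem

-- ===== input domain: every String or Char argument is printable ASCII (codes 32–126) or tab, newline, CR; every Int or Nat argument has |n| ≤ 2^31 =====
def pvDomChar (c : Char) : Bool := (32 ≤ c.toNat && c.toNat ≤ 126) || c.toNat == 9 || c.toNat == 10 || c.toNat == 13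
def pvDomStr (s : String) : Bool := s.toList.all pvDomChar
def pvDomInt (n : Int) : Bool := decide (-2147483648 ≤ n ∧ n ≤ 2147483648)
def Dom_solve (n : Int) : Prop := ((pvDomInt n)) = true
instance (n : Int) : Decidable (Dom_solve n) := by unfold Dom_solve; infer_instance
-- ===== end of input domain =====

-- B rebuilds the string left-to-right from n's binary digits in one pass instead of
-- A's halving/decrement loop that prepends a character per step (objective: alternative).

-- ===== PORT A =====
-- the while loop of A, state (n, s); strings handled as List Char, prepend "X" + s = 'X' :: s
def solveGoA (n : Int) (s : List Char) : List Char :=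
  if _h : n > 0 then
    if PySem.Int.mod n 2 = 0 then
      solveGoA (PySem.Int.floordiv n 2) ('B' :: s)
    else
      solveGoA (n - 1) ('A' :: s)
  else s
termination_by n.toNat
decreasing_by
  · rw [PySem.Int.floordiv_eq_ediv_of_pos (by omega : (0:Int) < 2)]; omega
  · omega

def solve (n : Int) : String := String.mk (solveGoA n [])

-- ===== PORT B =====
-- Source B's first while loop: binary digits of m, least significant first
def lsbBits (m : Nat) : List Char :=
  if m = 0 then []
  else (if m % 2 = 1 then '1' else '0') :: lsbBits (m / 2)

-- Source B's for-loop body: out.append("B"); if d == '1': out.append("A")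
def stepB (acc : List Char) (d : Char) : List Char :=
  let acc := acc ++ ['B']
  if d = '1' then acc ++ ['A'] else acc

def solve_alt (n : Int) : String :=
  if n ≤ 0 then ""
  else
    let bits := (lsbBits n.toNat).reverse   -- bits.reverse(): MSB first
    String.mk ((bits.drop 1).foldl stepB ['A'])  -- bits[1:]; out = ["A"] then the loop

-- ===== PRECONDITION & SPEC =====
def Spec_solve (n : Int) (out : String) : Prop := out = solve_alt n
instance (n : Int) (out : String) : Decidable (Spec_solve n out) := by unfold Spec_solve; infer_instance

-- ===== CLAIM (what is proved, stated in full; the proofs are below) =====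
def Claim_equal_solve : Prop := ∀ (n : Int), Dom_solve n → Spec_solve n (solve n)


-- ===== LEMMAS AND PROOFS =====

-- A's result as a pure function of the loop variable (no accumulator)
def Fc (m : Nat) : List Char :=
  if m = 0 then []
  else if m % 2 = 0 then Fc (m / 2) ++ ['B']
  else Fc (m - 1) ++ ['A']
termination_by m
decreasing_by all_goals omega

theorem Fc_zero : Fc 0 = [] := by rw [Fc]; simp

theorem Fc_even {m : Nat} (h0 : m ≠ 0) (he : m % 2 = 0) :
    Fc m = Fc (m / 2) ++ ['B'] := by rw [Fc, if_neg h0, if_pos he]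

theorem Fc_odd {m : Nat} (h0 : m ≠ 0) (he : ¬ m % 2 = 0) :
    Fc m = Fc (m - 1) ++ ['A'] := by rw [Fc, if_neg h0, if_neg he]

theorem goA_eq : ∀ (k : Nat) (n : Int), n.toNat = k →
    ∀ s, solveGoA n s = Fc n.toNat ++ s := by
  intro k
  induction k using Nat.strong_induction_on with
  | _ k ih =>
    intro n hk s
    rw [solveGoA]
    by_cases hpos : n > 0
    · rw [dif_pos hpos]
      have hmod : PySem.Int.mod n 2 = n % 2 := PySem.Int.mod_eq_emod_of_pos (by omega)
      by_cases hev : n % 2 = 0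
      · rw [if_pos (by rw [hmod]; exact hev)]
        rw [PySem.Int.floordiv_eq_ediv_of_pos (by omega : (0:Int) < 2)]
        rw [ih (n / 2).toNat (by omega) (n / 2) rfl]
        have h2 : (n / 2).toNat = n.toNat / 2 := by omega
        conv_rhs => rw [Fc_even (show n.toNat ≠ 0 by omega) (show n.toNat % 2 = 0 by omega)]
        rw [h2]; simp
      · rw [if_neg (by rw [hmod]; exact hev)]
        rw [ih (n - 1).toNat (by omega) (n - 1) rfl]
        have h1 : (n - 1).toNat = n.toNat - 1 := by omega
        conv_rhs => rw [Fc_odd (show n.toNat ≠ 0 by omega) (show ¬ n.toNat % 2 = 0 by omega)]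
        rw [h1]; simp
    · rw [dif_neg hpos]
      have h0 : n.toNat = 0 := by omega
      rw [h0, Fc_zero]; simp

theorem lsbBits_ne_nil {m : Nat} (h : 0 < m) : lsbBits m ≠ [] := by
  rw [lsbBits, if_neg (by omega)]; simp

theorem drop_one_append_last (xs : List Char) (c : Char) (h : xs ≠ []) :
    (xs ++ [c]).drop 1 = xs.drop 1 ++ [c] := by
  cases xs with
  | nil => exact absurd rfl h
  | cons a t => simp

-- B's loop result as a function of m, equals Fc m
theorem alt_eq_Fc : ∀ (m : Nat), 0 < m →
    ((lsbBits m).reverse.drop 1).foldl stepB ['A'] = Fc m := by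
  intro m
  induction m using Nat.strong_induction_on with
  | _ m ih =>
    intro hm
    by_cases h1 : m = 1
    · subst h1
      rw [Fc_odd (by omega) (by omega), show (1:Nat) - 1 = 0 from rfl, Fc_zero]
      rw [lsbBits, if_neg (by omega), show (1:Nat) % 2 = 1 from rfl,
          show (1:Nat) / 2 = 0 from rfl, lsbBits]
      simp
    · have hq : 0 < m / 2 := by omega
      rw [lsbBits, if_neg (by omega)]
      rw [List.reverse_cons,
          drop_one_append_last _ _ (by simp [lsbBits_ne_nil hq]),
          List.foldl_append, ih (m / 2) (by omega) hq]
      simp only [List.foldl]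
      by_cases hev : m % 2 = 0
      · rw [if_neg (by omega : ¬ m % 2 = 1)]
        conv_rhs => rw [Fc_even (show m ≠ 0 by omega) hev]
        simp [stepB]
      · rw [if_pos (by omega : m % 2 = 1)]
        conv_rhs => rw [Fc_odd (show m ≠ 0 by omega) hev,
                        Fc_even (show m - 1 ≠ 0 by omega) (show (m - 1) % 2 = 0 by omega)]
        rw [show (m - 1) / 2 = m / 2 from by omega]
        simp [stepB]

-- ===== VERDICT (by name: the statement is the Claim_ definition above) =====
theorem solve_spec : Claim_equal_solve := by
  intro n _
  unfold Spec_solve solve solve_alt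
  rw [goA_eq n.toNat n rfl []]
  by_cases h : n ≤ 0
  · rw [if_pos h, show n.toNat = 0 from by omega, Fc_zero]; rfl
  · rw [if_neg h]
    show String.mk (Fc n.toNat ++ []) =
      String.mk (((lsbBits n.toNat).reverse.drop 1).foldl stepB ['A'])
    rw [alt_eq_Fc n.toNat (by omega)]
    simp
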